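-- pv_equiv track=rewrite | github.com/linglingithub/myhello | misc/candy.py | candy_wrong
-- ===== SOURCE A (Python) =====
-- def candy_wrong(ratings):
--     """
--     :type ratings: List[int]
--     :rtype: int
--     """
--     if not ratings:
--         return 0
--     total = 1
--     cnt = 1
--     ratings.sort()
--     for i in range(1,len(ratings)):
--         if ratings[i] > ratings[i-1]:
--             cnt += 1
--         total += cnt
--     return total
-- ===== SOURCE B (Python) =====
-- def candy_wrong(ratings):
--     """
--     :type ratings: List[int]
--     :rtype: int
--     """
--     ratings.sort()  # same in-place sort as the original
--     counts = {}
--     for r in ratings: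
--         counts[r] = counts.get(r, 0) + 1
--     total = 0
--     for rank, c in enumerate(counts.values(), 1):
--         total += rank * c
--     return total
-- ===== Notes on version B (the rewrite author's own statement) =====
-- stated objective: alternative
-- what changed: Replaces the running rank/accumulator scan over adjacent pairs with a frequency dict built from the sorted list and a sum of rank*count over its values, with no empty-list special case.
import Mathlib
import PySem

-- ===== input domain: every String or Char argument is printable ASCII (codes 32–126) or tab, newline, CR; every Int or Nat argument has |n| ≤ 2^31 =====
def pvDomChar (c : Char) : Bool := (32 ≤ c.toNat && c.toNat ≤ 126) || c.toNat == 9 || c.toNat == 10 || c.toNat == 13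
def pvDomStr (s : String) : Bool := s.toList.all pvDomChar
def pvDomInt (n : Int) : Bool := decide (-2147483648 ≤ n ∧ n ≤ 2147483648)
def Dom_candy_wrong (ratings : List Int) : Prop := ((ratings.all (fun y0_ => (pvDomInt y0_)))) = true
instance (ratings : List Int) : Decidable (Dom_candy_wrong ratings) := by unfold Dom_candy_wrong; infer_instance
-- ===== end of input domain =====

-- B replaces A's running rank/accumulator scan with a frequency dict over the sorted
-- list and a sum of rank*count over its values (alternative decomposition, same cost).
-- Both A and B sort `ratings` in place; the equivalence proved is about the return value.

-- ===== PORT A =====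
-- the 'for i in range(1, len(ratings))' loop, carrying (prev, cnt, total)
def aLoop : List Int → Int → Int → Int → Int
  | [], _, _, total => total
  | x :: xs, prev, cnt, total =>
      let cnt' := if prev < x then cnt + 1 else cnt
      aLoop xs x cnt' (total + cnt')

def candy_wrong (ratings : List Int) : Int :=
  if ratings = [] then 0
  else
    match PySem.List.sorted ratings (fun x => x) with
    | [] => 0              -- unreachable: sorted of a nonempty list is nonempty
    | h :: t => aLoop t h 1 1

-- ===== PORT B =====
def candy_wrong_alt (ratings : List Int) : Int :=
  let s := PySem.List.sorted ratings (fun x => x)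
  let counts := s.foldl (fun d r => d.insert r (d.getD r 0 + 1)) PySem.Dict.empty
  (PySem.List.enumerate counts.values 1).foldl (fun total p => total + p.1 * p.2) 0

-- ===== PRECONDITION & SPEC =====
def Spec_candy_wrong (ratings : List Int) (out : Int) : Prop := out = candy_wrong_alt ratings
instance (ratings : List Int) (out : Int) : Decidable (Spec_candy_wrong ratings out) := by unfold Spec_candy_wrong; infer_instance

-- ===== CLAIM (what is proved, stated in full; the proofs are below) =====
def Claim_equal_candy_wrong : Prop := ∀ (ratings : List Int), Dom_candy_wrong ratings → Spec_candy_wrong ratings (candy_wrong ratings)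

-- ===== LEMMAS AND PROOFS =====

-- run-length encoding of the tail t of a sorted list, current run value v seen c times
def runsFrom (v c : Int) : List Int → List (Int × Int)
  | [] => [(v, c)]
  | x :: xs => if x = v then runsFrom v (c + 1) xs else (v, c) :: runsFrom x 1 xs

-- Σ rank * count, ranks starting at r
def esum (r : Int) : List Int → Int
  | [] => 0
  | c :: cs => r * c + esum (r + 1) cs

def headRun (v : Int) : List Int → Int
  | [] => 0
  | x :: xs => if x = v then 1 + headRun v xs else 0

def tailSnds (v : Int) : List Int → List Int
  | [] => []
  | x :: xs => if x = v then tailSnds v xs else (runsFrom x 1 xs).map Prod.snd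

theorem runsFrom_snd (xs : List Int) : ∀ (v c : Int),
    (runsFrom v c xs).map Prod.snd = (c + headRun v xs) :: tailSnds v xs := by
  induction xs with
  | nil => intro v c; simp [runsFrom, headRun, tailSnds]
  | cons x xs ih =>
      intro v c
      by_cases hxv : x = v
      · simp only [runsFrom, headRun, tailSnds, if_pos hxv, ih]
        congr 1; ring
      · simp [runsFrom, headRun, tailSnds, hxv, ih]

theorem esum_shift (v cnt c : Int) (xs : List Int) :
    esum cnt ((runsFrom v (c + 1) xs).map Prod.snd)
      = cnt + esum cnt ((runsFrom v c xs).map Prod.snd) := by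
  rw [runsFrom_snd, runsFrom_snd]
  simp [esum]; ring

theorem aLoop_eq (t : List Int) : ∀ (h cnt total : Int),
    List.Pairwise (· ≤ ·) (h :: t) →
    aLoop t h cnt total = total - cnt + esum cnt ((runsFrom h 1 t).map Prod.snd) := by
  induction t with
  | nil => intro h cnt total _; simp [aLoop, runsFrom, esum]
  | cons x xs ih =>
      intro h cnt total hp
      have hhx : h ≤ x := (List.pairwise_cons.mp hp).1 x (by simp)
      have hps : List.Pairwise (· ≤ ·) (x :: xs) := (List.pairwise_cons.mp hp).2
      by_cases hxh : x = h
      · subst hxh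
        have hlt : ¬ (x < x) := lt_irrefl x
        simp only [aLoop, if_neg hlt]
        rw [ih x cnt (total + cnt) hps]
        have hr : runsFrom x 1 (x :: xs) = runsFrom x (1 + 1) xs := by
          simp [runsFrom]
        rw [hr, esum_shift]
        ring
      · have hlt : h < x := lt_of_le_of_ne hhx (fun e => hxh e.symm)
        simp only [aLoop, if_pos hlt]
        rw [ih x (cnt + 1) (total + (cnt + 1)) hps]
        simp only [runsFrom, if_neg hxh, List.map_cons, esum]
        ring

theorem contains_false_of_lt (d : PySem.Dict Int Int) (h : Int)
    (hk : ∀ k ∈ d.keys, k < h) : d.contains h = false := by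
  cases hc : d.contains h with
  | false => rfl
  | true =>
      exact absurd (hk h ((PySem.Dict.contains_iff_mem_keys d h).mp hc)) (lt_irrefl h)

theorem items_key_ne (d : PySem.Dict Int Int) (h : Int)
    (hc : d.contains h = false) : ∀ p ∈ d.items, p.1 ≠ h := by
  intro p hp he
  have : d.contains h = true := (PySem.Dict.contains_iff_mem_keys d h).mpr
    (he ▸ PySem.Dict.mem_keys_of_mem_items d hp)
  simp [hc] at this

theorem insert_insert_self (d : PySem.Dict Int Int) (h c v : Int)
    (hc : d.contains h = false) :
    (d.insert h c).insert h v = d.insert h v := by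
  apply PySem.Dict.ext
  rw [PySem.Dict.items_insert_of_contains _ _ (PySem.Dict.contains_insert_self d h c),
      PySem.Dict.items_insert_of_not_contains _ _ hc,
      PySem.Dict.items_insert_of_not_contains _ _ hc,
      List.map_append]
  have : d.items.map (fun p => if p.1 == h then (h, v) else p) = d.items := by
    refine (List.map_congr_left ?_).trans (List.map_id d.items)
    intro p hp
    simp [items_key_ne d h hc p hp]
  rw [this]
  simp

theorem bFold_eq (t : List Int) : ∀ (d : PySem.Dict Int Int) (h c : Int),
    List.Pairwise (· ≤ ·) (h :: t) → (∀ k ∈ d.keys, k < h) →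
    (t.foldl (fun d r => d.insert r (d.getD r 0 + 1)) (d.insert h c)).items
      = d.items ++ runsFrom h c t := by
  induction t with
  | nil =>
      intro d h c _ hk
      simp [runsFrom,
        PySem.Dict.items_insert_of_not_contains _ _ (contains_false_of_lt d h hk)]
  | cons x xs ih =>
      intro d h c hp hk
      have hhx : h ≤ x := (List.pairwise_cons.mp hp).1 x (by simp)
      have hps : List.Pairwise (· ≤ ·) (x :: xs) := (List.pairwise_cons.mp hp).2
      have hdc : d.contains h = false := contains_false_of_lt d h hk
      by_cases hxh : x = h
      · subst hxh
        simp only [List.foldl_cons]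
        rw [PySem.Dict.getD_insert_self, insert_insert_self d x c (c + 1) hdc,
            ih d x (c + 1) hps hk]
        simp [runsFrom]
      · have hlt : h < x := lt_of_le_of_ne hhx (fun e => hxh e.symm)
        simp only [List.foldl_cons]
        have hxd : d.contains x = false := by
          apply contains_false_of_lt
          intro k hkm; exact lt_trans (hk k hkm) hlt
        have hgd : (d.insert h c).getD x 0 = 0 := by
          rw [PySem.Dict.getD_insert_of_ne _ _ _ hxh,
              PySem.Dict.getD_of_not_contains _ _ hxd]
        rw [hgd]
        have hk' : ∀ k ∈ (d.insert h c).keys, k < x := by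
          intro k hkm
          rw [PySem.Dict.keys_insert_of_not_contains _ _ hdc] at hkm
          rcases List.mem_append.mp hkm with hm | hm
          · exact lt_trans (hk k hm) hlt
          · simp at hm; omega
        rw [show (0 : Int) + 1 = 1 by ring, ih (d.insert h c) x 1 hps hk',
            PySem.Dict.items_insert_of_not_contains _ _ hdc]
        simp [runsFrom, hxh]

theorem enum_fold_eq (vals : List Int) : ∀ (r acc : Int),
    (PySem.List.enumerate vals r).foldl (fun total p => total + p.1 * p.2) acc
      = acc + esum r vals := by
  induction vals with
  | nil => intro r acc; simp [PySem.List.enumerate_nil, esum]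
  | cons c cs ih =>
      intro r acc
      rw [PySem.List.enumerate_cons, List.foldl_cons, ih]
      simp [esum]; ring

-- ===== VERDICT (by name: the statement is the Claim_ definition above) =====
theorem candy_wrong_spec : Claim_equal_candy_wrong := by
  intro ratings _
  unfold Spec_candy_wrong candy_wrong candy_wrong_alt
  by_cases hnil : ratings = []
  · subst hnil
    simp [PySem.List.sorted, PySem.Dict.empty]
  · simp only [if_neg hnil]
    have hsn : PySem.List.sorted ratings (fun x => x) ≠ [] := by
      rw [Ne, PySem.List.sorted_eq_nil_iff]; exact hnil
    obtain ⟨h, t, hst⟩ := List.exists_cons_of_ne_nil hsn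
    have hpw : List.Pairwise (· ≤ ·) (h :: t) := by
      have := PySem.List.sorted_pairwise (xs := ratings) (key := fun x => x)
      rw [hst] at this
      simpa using this
    rw [hst]
    simp only [List.foldl_cons]
    rw [PySem.Dict.getD_empty]
    rw [show ((0 : Int) + 1) = 1 by ring]
    have hitems := bFold_eq t PySem.Dict.empty h 1 hpw (by simp [PySem.Dict.keys_empty])
    have hvals : (t.foldl (fun d r => d.insert r (d.getD r 0 + 1))
        (PySem.Dict.empty.insert h 1)).values = (runsFrom h 1 t).map Prod.snd := by
      simp only [PySem.Dict.values, hitems]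
      have hemp : (PySem.Dict.empty : PySem.Dict Int Int).items = [] := rfl
      simp [hemp]
    rw [hvals, enum_fold_eq, aLoop_eq t h 1 1 hpw]
    ring
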